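-- pv_equiv track=rewrite | github.com/eforgacs/schoolSandbox | fundamental_algorithms/Midterm/max_concurrency.py | max_concurrency_attempt_3
-- ===== SOURCE A (Python) =====
-- def max_concurrency_attempt_3(s):
--     """Fails 9 tests."""
--     es = []
--     for start, end in s:
--         es.append((start, -1))
--         es.append((end, 1))
--     es.sort()
--     result = 0
--     n = 0
--     for start, s in es:
--         if s == -1:
--             result += n
--         n -= s
--     return result
-- ===== SOURCE B (Python) =====
-- def max_concurrency_attempt_3(s):
--     n = len(s)
--     before = sum(1 for start, _ in s for _, end in s if end < start)
--     return n * (n - 1) // 2 - before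
-- ===== Notes on version B (the rewrite author's own statement) =====
-- stated objective: simpler
-- what changed: Replaced A's build-event-list / sort / sweep-with-counter by the closed form n*(n-1)//2 minus a direct double-loop count of (start, end') pairs with end' < start, with no event list and no sort.
import Mathlib
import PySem

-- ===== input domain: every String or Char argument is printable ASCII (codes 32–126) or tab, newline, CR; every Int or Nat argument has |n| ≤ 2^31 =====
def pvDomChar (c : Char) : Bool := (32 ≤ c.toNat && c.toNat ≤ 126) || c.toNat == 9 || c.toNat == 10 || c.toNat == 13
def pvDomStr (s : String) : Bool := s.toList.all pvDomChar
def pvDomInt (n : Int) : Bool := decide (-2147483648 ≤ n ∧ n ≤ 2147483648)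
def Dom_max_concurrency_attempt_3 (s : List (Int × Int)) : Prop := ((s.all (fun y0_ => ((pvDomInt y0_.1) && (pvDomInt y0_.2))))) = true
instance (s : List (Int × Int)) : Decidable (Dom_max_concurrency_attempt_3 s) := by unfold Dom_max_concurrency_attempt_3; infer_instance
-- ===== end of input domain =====

-- B replaces A's event-sort-and-sweep by the closed form n*(n-1)//2 minus the count of
-- (start, end') pairs with end' < start; objective: simpler (same exact result).


-- ===== PORT A =====
def max_concurrency_attempt_3 (s : List (Int × Int)) : Int :=
  -- es = []; for start, end in s: es.append((start,-1)); es.append((end,1))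
  let es : List (Int × Int) := s.foldl (fun acc p => (acc ++ [(p.1, -1)]) ++ [(p.2, 1)]) []
  -- es.sort()  (lexicographic on the pairs)
  let es := PySem.List.sorted2 es Prod.fst Prod.snd
  -- result = 0; n = 0; for start, s in es: if s == -1: result += n;  n -= s
  (es.foldl (fun (st : Int × Int) ev =>
      (if ev.2 = -1 then st.1 + st.2 else st.1, st.2 - ev.2)) ((0 : Int), (0 : Int))).1

-- ===== PORT B =====
def max_concurrency_attempt_3_alt (s : List (Int × Int)) : Int :=
  let n : Int := s.length
  let before : Int := (s.map (fun p => ((s.filter (fun q => q.2 < p.1)).length : Int))).sum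
  PySem.Int.floordiv (n * (n - 1)) 2 - before

-- ===== PRECONDITION & SPEC =====
def Spec_max_concurrency_attempt_3 (s : List (Int × Int)) (out : Int) : Prop := out = max_concurrency_attempt_3_alt s
instance (s : List (Int × Int)) (out : Int) : Decidable (Spec_max_concurrency_attempt_3 s out) := by unfold Spec_max_concurrency_attempt_3; infer_instance

-- ===== CLAIM (what is proved, stated in full; the proofs are below) =====
def Claim_equal_max_concurrency_attempt_3 : Prop := ∀ (s : List (Int × Int)), Dom_max_concurrency_attempt_3 s → Spec_max_concurrency_attempt_3 s (max_concurrency_attempt_3 s)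

-- ===== LEMMAS AND PROOFS =====

-- the event order A's sort realises: ascending lexicographically on (time, tag)
def evLe (a b : Int × Int) : Prop := a.1 < b.1 ∨ (a.1 = b.1 ∧ a.2 ≤ b.2)

-- A's sweep, isolated from the (result, n) pair state
def pvSweep (n : Int) : List (Int × Int) → Int
  | [] => 0
  | (_, g) :: L => (if g = -1 then n else 0) + pvSweep (n - g) L

-- triangular number Σ_{i<k} i as an Int
def pvTri : Nat → Int
  | 0 => 0
  | k + 1 => pvTri k + k

-- number of ends in L strictly below t
def pvCntEnds (L : List (Int × Int)) (t : Int) : Int :=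
  L.countP (fun q => decide (q.2 = 1 ∧ q.1 < t))

-- Σ over start events p of L of pvCntEnds L p.1
def pvC (L : List (Int × Int)) : Int :=
  (L.map (fun p => if p.2 = -1 then pvCntEnds L p.1 else 0)).sum

-- number of start events
def pvK (L : List (Int × Int)) : Nat := L.countP (fun p => decide (p.2 = -1))

lemma pvFoldl_fst (L : List (Int × Int)) : ∀ (r n : Int),
    (L.foldl (fun (st : Int × Int) ev =>
      (if ev.2 = -1 then st.1 + st.2 else st.1, st.2 - ev.2)) (r, n)).1
      = r + pvSweep n L := by
  induction L with
  | nil => intro r n; simp [pvSweep]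
  | cons e L ih =>
      intro r n
      simp only [List.foldl_cons, pvSweep, ih]
      by_cases h : e.2 = -1
      · simp [h]; try ring
      · simp [h]; try ring

lemma evLt_false_iff (a b : Int × Int) :
    (decide (a.1 < b.1) || (!decide (b.1 < a.1) && decide (a.2 < b.2))) = false ↔ evLe b a := by
  simp [evLe]; omega

lemma pairwise_insertBy (x : Int × Int) (ys : List (Int × Int))
    (h : ys.Pairwise evLe) :
    (PySem.List.insertBy
      (fun a b => decide (a.1 < b.1) || (!decide (b.1 < a.1) && decide (a.2 < b.2))) x ys).Pairwise evLe := by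
  induction ys with
  | nil => simp [PySem.List.insertBy, h]
  | cons y ys ih =>
      rw [List.pairwise_cons] at h
      obtain ⟨hy, hys⟩ := h
      by_cases hb : (decide (x.1 < y.1) || (!decide (y.1 < x.1) && decide (x.2 < y.2))) = true
      · simp only [PySem.List.insertBy, hb, if_pos]
        refine List.Pairwise.cons ?_ (List.Pairwise.cons hy hys)
        intro z hz
        have hxy : evLe x y := by simp [evLe] at hb ⊢; omega
        rcases List.mem_cons.mp hz with rfl | hz
        · exact hxy
        · have := hy z hz
          unfold evLe at *; omega
      · have hb' : evLe y x := (evLt_false_iff x y).mp (by simpa using hb)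
        simp only [PySem.List.insertBy, hb, if_neg, Bool.false_eq_true, not_false_iff]
        refine List.Pairwise.cons ?_ (ih hys)
        intro z hz
        rw [PySem.List.mem_insertBy] at hz
        rcases hz with rfl | hz
        · exact hb'
        · exact hy z hz

lemma sorted2_pairwise (xs : List (Int × Int)) :
    (PySem.List.sorted2 xs Prod.fst Prod.snd).Pairwise evLe := by
  unfold PySem.List.sorted2
  simp only []
  induction xs using List.reverseRecOn with
  | nil => simp
  | append_singleton xs x ih =>
      rw [List.foldl_append, List.foldl_cons, List.foldl_nil]
      exact pairwise_insertBy x _ ih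

-- the key invariant of A's sweep on a sorted event list with tags in {-1, 1}
lemma pvSweep_sorted : ∀ (L : List (Int × Int)), L.Pairwise evLe →
    (∀ p ∈ L, p.2 = -1 ∨ p.2 = 1) → ∀ n : Int,
    pvSweep n L = n * pvK L + pvTri (pvK L) - pvC L := by
  intro L
  induction L with
  | nil => intro _ _ n; simp [pvSweep, pvK, pvC, pvTri]
  | cons e L ih =>
      intro hsorted htags n
      rw [List.pairwise_cons] at hsorted
      obtain ⟨hmin, hsorted'⟩ := hsorted
      have htags' : ∀ p ∈ L, p.2 = -1 ∨ p.2 = 1 := fun p hp => htags p (List.mem_cons_of_mem _ hp)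
      obtain ⟨t, g⟩ := e
      rcases htags (t, g) (List.mem_cons_self) with hg | hg <;> simp only at hg <;> subst hg
      · -- head is a start (t, -1)
        have hK : pvK ((t, -1) :: L) = pvK L + 1 := by simp [pvK]
        have hcnt0 : pvCntEnds L t = 0 := by
          have h0 : L.countP (fun q => decide (q.2 = 1 ∧ q.1 < t)) = 0 := by
            rw [List.countP_eq_zero]
            simp only [decide_eq_true_eq, not_and, Prod.forall]
            intro a b hab hb
            have := hmin (a, b) hab
            simp only [evLe] at this
            omega
          simp only [pvCntEnds]
          exact_mod_cast h0
        have hcnt : ∀ x, pvCntEnds ((t, -1) :: L) x = pvCntEnds L x := by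
          intro x; simp [pvCntEnds]
        have hC : pvC ((t, -1) :: L) = pvC L := by
          simp only [pvC, List.map_cons, List.sum_cons, hcnt, hcnt0]
          simp
        rw [hK, hC]
        have := ih hsorted' htags' (n - (-1))
        simp only [pvSweep, this, pvTri]
        push_cast
        ring
      · -- head is an end (t, 1)
        have hK : pvK ((t, 1) :: L) = pvK L := by simp [pvK]
        have hlt : ∀ p ∈ L, p.2 = -1 → t < p.1 := by
          intro p hp hpt
          have := hmin p hp
          unfold evLe at this
          omega
        have hcnt : ∀ p ∈ L, (if p.2 = -1 then pvCntEnds ((t, 1) :: L) p.1 else 0)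
            = (if p.2 = -1 then pvCntEnds L p.1 + 1 else 0) := by
          intro p hp
          by_cases hpt : p.2 = -1
          · simp only [hpt]
            simp [pvCntEnds, hlt p hp hpt]
          · simp [hpt]
        have hC : pvC ((t, 1) :: L) = pvC L + pvK L := by
          simp only [pvC, List.map_cons, List.sum_cons]
          rw [List.map_congr_left hcnt]
          have : (L.map fun p => if p.2 = -1 then pvCntEnds L p.1 + 1 else 0)
              = L.map (fun p => (if p.2 = -1 then pvCntEnds L p.1 else 0) + (if p.2 = -1 then (1:Int) else 0)) := by
            apply List.map_congr_left; intro p _; by_cases h : p.2 = -1 <;> simp [h]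
          rw [this, PySem.List.sum_map_add_int]
          have hones : (L.map fun p => if p.2 = -1 then (1:Int) else 0).sum = (pvK L : Int) := by
            unfold pvK
            rw [← PySem.List.sum_map_ite_one_zero (fun p => decide (p.2 = -1)) L]
            simp
          simp [hones]
        rw [hK, hC]
        have := ih hsorted' htags' (n - 1)
        simp only [pvSweep, pvSweep, this]
        norm_num
        ring

-- perm-invariance of the three statistics
lemma pvCntEnds_perm {L L' : List (Int × Int)} (h : L.Perm L') (t : Int) :
    pvCntEnds L t = pvCntEnds L' t := by
  unfold pvCntEnds; exact congrArg Nat.cast (h.countP_eq _)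

lemma pvK_perm {L L' : List (Int × Int)} (h : L.Perm L') : pvK L = pvK L' := by
  unfold pvK; exact h.countP_eq _

lemma pvC_perm {L L' : List (Int × Int)} (h : L.Perm L') : pvC L = pvC L' := by
  unfold pvC
  have h1 : ∀ p : Int × Int, (if p.2 = -1 then pvCntEnds L p.1 else 0) = (if p.2 = -1 then pvCntEnds L' p.1 else 0) := by
    intro p; rw [pvCntEnds_perm h]
  rw [List.map_congr_left (fun p _ => h1 p)]
  exact (h.map _).sum_eq

-- A's event list is the flatMap of start/end event pairs
lemma pvEs_eq (s : List (Int × Int)) :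
    s.foldl (fun acc p => (acc ++ [(p.1, -1)]) ++ [(p.2, 1)]) ([] : List (Int × Int))
      = s.flatMap (fun p => [(p.1, (-1 : Int)), (p.2, 1)]) := by
  have : ∀ (s : List (Int × Int)) (acc : List (Int × Int)),
      s.foldl (fun acc p => (acc ++ [(p.1, -1)]) ++ [(p.2, 1)]) acc
        = acc ++ s.flatMap (fun p => [(p.1, (-1 : Int)), (p.2, 1)]) := by
    intro s
    induction s with
    | nil => intro acc; simp
    | cons p s ih =>
        intro acc
        rw [List.foldl_cons, ih, List.flatMap_cons]
        simp
  simpa using this s []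

lemma pvTags (s : List (Int × Int)) :
    ∀ p ∈ s.flatMap (fun p => [(p.1, (-1 : Int)), (p.2, 1)]), p.2 = -1 ∨ p.2 = 1 := by
  intro p hp
  simp only [List.mem_flatMap, List.mem_cons, List.not_mem_nil, or_false] at hp
  obtain ⟨q, _, hq | hq⟩ := hp <;> simp [hq]

lemma pvK_flatMap (s : List (Int × Int)) :
    pvK (s.flatMap (fun p => [(p.1, (-1 : Int)), (p.2, 1)])) = s.length := by
  induction s with
  | nil => simp [pvK]
  | cons p s ih => simp [pvK] at ih ⊢; omega

lemma pvCntEnds_flatMap (s : List (Int × Int)) (t : Int) :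
    pvCntEnds (s.flatMap (fun p => [(p.1, (-1 : Int)), (p.2, 1)])) t
      = ((s.filter (fun q => q.2 < t)).length : Int) := by
  induction s with
  | nil => simp [pvCntEnds]
  | cons p s ih =>
      have hpre : List.countP (fun q => decide (q.2 = 1 ∧ q.1 < t)) [(p.1, (-1 : Int)), (p.2, 1)]
          = if p.2 < t then 1 else 0 := by
        by_cases h : p.2 < t <;> simp [h]
      simp only [pvCntEnds, List.flatMap_cons, List.countP_append, List.filter_cons] at ih ⊢
      rw [hpre]
      by_cases h : p.2 < t
      · simp [h] at ih ⊢; omega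
      · simp [h] at ih ⊢; omega

lemma pvC_flatMap (s : List (Int × Int)) :
    pvC (s.flatMap (fun p => [(p.1, (-1 : Int)), (p.2, 1)]))
      = (s.map (fun p => ((s.filter (fun q => q.2 < p.1)).length : Int))).sum := by
  unfold pvC
  have aux : ∀ (u : List (Int × Int)) (f : Int → Int),
      ((u.flatMap (fun p => [(p.1, (-1 : Int)), (p.2, 1)])).map
        (fun p => if p.2 = -1 then f p.1 else 0)).sum = (u.map (fun p => f p.1)).sum := by
    intro u f
    induction u with
    | nil => simp
    | cons a u ih => simp [List.flatMap_cons, ih]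
  rw [aux s _]
  apply congrArg
  apply List.map_congr_left
  intro p _
  exact pvCntEnds_flatMap s p.1

lemma pvTri_floordiv (k : Nat) :
    PySem.Int.floordiv ((k : Int) * ((k : Int) - 1)) 2 = pvTri k := by
  have h2 : (2 : Int) * pvTri k = (k : Int) * ((k : Int) - 1) := by
    induction k with
    | zero => simp [pvTri]
    | succ k ih => simp only [pvTri]; push_cast; push_cast at ih; linarith
  rw [PySem.Int.floordiv_eq_ediv_of_pos (by norm_num), ← h2,
    Int.mul_ediv_cancel_left _ (by norm_num)]

-- ===== VERDICT (by name: the statement is the Claim_ definition above) =====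
theorem max_concurrency_attempt_3_spec : Claim_equal_max_concurrency_attempt_3 := by
  intro s _
  unfold Spec_max_concurrency_attempt_3 max_concurrency_attempt_3 max_concurrency_attempt_3_alt
  simp only [pvEs_eq]
  set es := s.flatMap (fun p => [(p.1, (-1 : Int)), (p.2, 1)]) with hes
  set es2 := PySem.List.sorted2 es Prod.fst Prod.snd with hes2
  have hperm : es2.Perm es := PySem.List.sorted2_perm es Prod.fst Prod.snd false
  have htags : ∀ p ∈ es2, p.2 = -1 ∨ p.2 = 1 := fun p hp => pvTags s p (hperm.mem_iff.mp hp)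
  have hsweep := pvSweep_sorted es2 (sorted2_pairwise es) htags 0
  rw [pvFoldl_fst, hsweep, pvK_perm hperm, pvC_perm hperm, pvK_flatMap, pvC_flatMap,
    ← pvTri_floordiv]
  ring
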